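-- pv_equiv track=rewrite | github.com/Phamtien19122002/do-an-ra-truong | step2_merge/I_code.py | remaining_elements_count
-- ===== SOURCE A (Python) =====
-- def remaining_elements_count(a):
--     res = []
--     for i in a:
--         if len(res) == 0:
--             res.append(i)
--         else:
--             if (res[-1] + i) % 2 == 0:
--                 res.pop()
--             else:
--                 res.append(i)
--     return len(res)
-- ===== SOURCE B (Python) =====
-- def remaining_elements_count(a):
--     # Two scalars instead of a materialized stack: the stack strictly
--     # alternates in parity, so its size and the parity of its top suffice.
--     count = 0
--     top = 0
--     for i in a:
--         p = i % 2
--         if count == 0: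
--             count = 1
--             top = p
--         elif p == top:
--             count -= 1
--             top = 1 - top
--         else:
--             count += 1
--             top = p
--     return count
-- ===== Notes on version B (the rewrite author's own statement) =====
-- stated objective: alternative
-- what changed: Replaces the materialized stack (append/pop/peek on a list) with two scalars, the stack size and the parity of its top, using the invariant that the stack's parities strictly alternate.
import Mathlib
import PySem

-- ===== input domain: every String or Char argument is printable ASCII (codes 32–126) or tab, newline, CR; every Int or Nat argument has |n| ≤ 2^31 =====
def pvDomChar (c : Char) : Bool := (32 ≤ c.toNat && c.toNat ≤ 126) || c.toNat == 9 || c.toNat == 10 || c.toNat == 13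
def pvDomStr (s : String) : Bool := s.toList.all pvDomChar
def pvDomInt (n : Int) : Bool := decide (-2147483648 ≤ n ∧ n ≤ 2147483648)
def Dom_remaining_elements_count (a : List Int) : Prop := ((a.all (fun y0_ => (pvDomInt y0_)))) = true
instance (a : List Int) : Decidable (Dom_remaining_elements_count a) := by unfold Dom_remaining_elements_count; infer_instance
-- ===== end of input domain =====

-- B replaces A's materialized stack by two scalars (stack size + parity of the top),
-- exploiting that the stack's parities strictly alternate; same O(n) time, O(1) space.

-- ===== PORT A =====
-- A's stack `res` is kept head-first (head = Python res[-1]): append → cons,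
-- res[-1] → head, pop() → tail.  '% 2' is exact for Python '% 2' (positive divisor).
def pvStepA (res : List Int) (i : Int) : List Int :=
  if res.length = 0 then i :: res
  else
    match res with
    | [] => i :: res
    | h :: t => if (h + i) % 2 = 0 then t else i :: h :: t

def remaining_elements_count (a : List Int) : Int :=
  ((a.foldl pvStepA []).length : Int)

-- ===== PORT B =====
def pvStepB (s : Int × Int) (i : Int) : Int × Int :=
  let p := i % 2
  if s.1 = 0 then (1, p)
  else if p = s.2 then (s.1 - 1, 1 - s.2)
  else (s.1 + 1, p)

def remaining_elements_count_alt (a : List Int) : Int :=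
  (a.foldl pvStepB (0, 0)).1

-- ===== PRECONDITION & SPEC =====
def Spec_remaining_elements_count (a : List Int) (out : Int) : Prop := out = remaining_elements_count_alt a
instance (a : List Int) (out : Int) : Decidable (Spec_remaining_elements_count a out) := by unfold Spec_remaining_elements_count; infer_instance

-- ===== CLAIM (what is proved, stated in full; the proofs are below) =====
def Claim_equal_remaining_elements_count : Prop := ∀ (a : List Int), Dom_remaining_elements_count a → Spec_remaining_elements_count a (remaining_elements_count a)

-- ===== LEMMAS AND PROOFS =====

-- Simulation invariant: B's count is A's stack size, A's stack parities strictly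
-- alternate, and (when nonempty) the top's parity is B's `top`.
def pvInv (res : List Int) (s : Int × Int) : Prop :=
  s.1 = (res.length : Int) ∧
  List.IsChain (fun x y => x % 2 ≠ y % 2) res ∧
  (∀ h, res.head? = some h → h % 2 = s.2)

theorem pvStep_inv (res : List Int) (s : Int × Int) (i : Int) (hInv : pvInv res s) :
    pvInv (pvStepA res i) (pvStepB s i) := by
  obtain ⟨hlen, hchain, htop⟩ := hInv
  cases res with
  | nil =>
      have hs1 : s.1 = 0 := by simpa using hlen
      constructor
      · simp [pvStepA, pvStepB, hs1]
      constructor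
      · simp [pvStepA]
      · intro h hh
        simp [pvStepA, pvStepB, hs1] at hh ⊢
        omega
  | cons h t =>
      have hs1 : s.1 ≠ 0 := by simp at hlen; omega
      have htopv : h % 2 = s.2 := htop h rfl
      have hparity : ((h + i) % 2 = 0) ↔ (i % 2 = s.2) := by omega
      by_cases hc : (h + i) % 2 = 0
      · -- pop branch
        have hp : i % 2 = s.2 := hparity.mp hc
        refine ⟨?_, ?_, ?_⟩
        · simp [pvStepA, pvStepB, hc, hs1, hp] at hlen ⊢; omega
        · simpa [pvStepA, hc] using hchain.tail
        · intro h2 hh2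
          simp [pvStepA, pvStepB, hc, hs1, hp] at hh2 ⊢
          cases t with
          | nil => simp at hh2
          | cons h2' t' =>
              simp at hh2
              have hne : ¬ (h % 2 = h2' % 2) := (List.isChain_cons_cons.mp hchain).1
              omega
      · -- push branch
        have hp : i % 2 ≠ s.2 := fun h' => hc (hparity.mpr h')
        refine ⟨?_, ?_, ?_⟩
        · simp [pvStepA, pvStepB, hc, hs1, hp] at hlen ⊢; omega
        · simp [pvStepA, hc]
          exact ⟨fun he => hp (he.trans htopv), hchain⟩
        · intro h2 hh2
          simp [pvStepA, pvStepB, hc, hs1, hp] at hh2 ⊢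
          omega

theorem pvFold_inv (a : List Int) : ∀ (res : List Int) (s : Int × Int),
    pvInv res s → pvInv (a.foldl pvStepA res) (a.foldl pvStepB s) := by
  induction a with
  | nil => intro res s h; simpa using h
  | cons i rest ih =>
      intro res s h
      simpa using ih _ _ (pvStep_inv res s i h)

-- ===== VERDICT (by name: the statement is the Claim_ definition above) =====
theorem remaining_elements_count_spec : Claim_equal_remaining_elements_count := by
  intro a _
  have h := pvFold_inv a [] (0, 0) (by refine ⟨by simp, List.isChain_nil, by simp⟩)
  unfold Spec_remaining_elements_count remaining_elements_count remaining_elements_count_alt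
  exact h.1.symm
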